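-- pv_equiv track=rewrite | github.com/HectorZL/tokenizer_gui_python | logic.py | clean_tokens
-- ===== SOURCE A (Python) =====
-- def clean_tokens(tokens):
--     """Cleans subword tokens by removing the '##' prefix and joining words."""
--     cleaned_text = ''
--     for token in tokens:
--         if token.startswith('##'):
--             cleaned_text += token[2:]  # Append without '##' if it's a subword
--         else:
--             cleaned_text += ' ' + token  # Start a new word with a space
--     return cleaned_text.strip()
-- ===== SOURCE B (Python) =====
-- def clean_tokens(tokens):
--     """Cleans subword tokens by removing the '##' prefix and joining words."""
--     words = []
--     for token in tokens:
--         if token.startswith('##'):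
--             if words:
--                 words[-1] += token[2:]
--             else:
--                 words.append(token[2:])  # leading subword starts a word
--         else:
--             words.append(token)
--     return ' '.join(words).strip()
-- ===== Notes on version B (the rewrite author's own statement) =====
-- stated objective: idiomatic
-- what changed: B accumulates a list of complete words (appending '##' suffixes onto the last word) and returns ' '.join(words).strip(), instead of A's growing string with a hand-managed leading space.
import Mathlib
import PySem

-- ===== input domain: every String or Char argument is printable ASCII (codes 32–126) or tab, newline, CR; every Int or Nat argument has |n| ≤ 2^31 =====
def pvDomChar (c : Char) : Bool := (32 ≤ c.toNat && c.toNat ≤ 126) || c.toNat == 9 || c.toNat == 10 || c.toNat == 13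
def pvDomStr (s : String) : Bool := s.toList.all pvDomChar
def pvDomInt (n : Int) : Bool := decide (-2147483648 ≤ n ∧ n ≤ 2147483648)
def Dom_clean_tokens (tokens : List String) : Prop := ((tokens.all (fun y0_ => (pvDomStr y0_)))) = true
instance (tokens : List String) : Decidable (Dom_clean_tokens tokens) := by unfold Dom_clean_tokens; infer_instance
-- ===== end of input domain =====

-- B replaces A's growing string (with its hand-managed leading space) by a word list joined with ' '; same return value, no speed claim.

-- ===== PORT A =====
-- A's loop: cleaned_text += token[2:]  or  cleaned_text += ' ' + token; then .strip()
def cleanStepA (acc : List Char) (t : List Char) : List Char :=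
  if PySem.Chars.startswith t ['#', '#'] then
    acc ++ PySem.List.slice t (some 2) none
  else
    acc ++ (' ' :: t)

def clean_tokens (tokens : List String) : String :=
  String.ofList (PySem.Chars.strip (tokens.foldl (fun acc t => cleanStepA acc t.toList) []))

-- ===== PORT B =====
-- B's loop: maintain the list of complete words; '##' suffix goes onto the last word.
def cleanStepB (ws : List (List Char)) (t : List Char) : List (List Char) :=
  if PySem.Chars.startswith t ['#', '#'] then
    match ws.getLast? with
    | none => [PySem.List.slice t (some 2) none]
    | some w => ws.dropLast ++ [w ++ PySem.List.slice t (some 2) none]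
  else
    ws ++ [t]

def clean_tokens_alt (tokens : List String) : String :=
  String.ofList (PySem.Chars.strip
    (PySem.Chars.join [' '] (tokens.foldl (fun ws t => cleanStepB ws t.toList) [])))

-- ===== PRECONDITION & SPEC =====
def Spec_clean_tokens (tokens : List String) (out : String) : Prop := out = clean_tokens_alt tokens
instance (tokens : List String) (out : String) : Decidable (Spec_clean_tokens tokens out) := by unfold Spec_clean_tokens; infer_instance

-- ===== CLAIM (what is proved, stated in full; the proofs are below) =====
def Claim_equal_clean_tokens : Prop := ∀ (tokens : List String), Dom_clean_tokens tokens → Spec_clean_tokens tokens (clean_tokens tokens)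

-- ===== LEMMAS AND PROOFS =====

-- A's accumulator vs B's word list: either both empty, or the string is the join,
-- possibly with one leading space (from A's ' ' + token on the first word).
def cleanRel (s : List Char) (ws : List (List Char)) : Prop :=
  (s = [] ∧ ws = []) ∨
  (ws ≠ [] ∧ (s = PySem.Chars.join [' '] ws ∨ s = ' ' :: PySem.Chars.join [' '] ws))

theorem join_append_last (ws : List (List Char)) (w u : List Char)
    (h : ws.getLast? = some w) :
    PySem.Chars.join [' '] (ws.dropLast ++ [w ++ u]) = PySem.Chars.join [' '] ws ++ u := by
  induction ws with
  | nil => simp at h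
  | cons a tl ih =>
    cases tl with
    | nil =>
      simp [List.getLast?] at h
      simp [h, PySem.Chars.join_singleton]
    | cons b tl' =>
      have h' : (b :: tl').getLast? = some w := by
        simpa [List.getLast?_cons_cons] using h
      have := ih h'
      simp only [List.dropLast_cons_of_ne_nil (by simp : b :: tl' ≠ [])] at *
      have hne : (b :: tl').dropLast ++ [w ++ u] ≠ [] := by simp
      cases hd : (b :: tl').dropLast ++ [w ++ u] with
      | nil => exact absurd hd hne
      | cons c cs =>
        rw [List.cons_append, hd, PySem.Chars.join_cons_cons, ← hd, this,
            PySem.Chars.join_cons_cons]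
        simp

theorem join_snoc (ws : List (List Char)) (t : List Char) (h : ws ≠ []) :
    PySem.Chars.join [' '] (ws ++ [t]) = PySem.Chars.join [' '] ws ++ (' ' :: t) := by
  induction ws with
  | nil => exact absurd rfl h
  | cons a tl ih =>
    cases tl with
    | nil => simp [PySem.Chars.join_cons_cons, PySem.Chars.join_singleton]
    | cons b tl' =>
      have := ih (by simp)
      simp only [List.cons_append] at this ⊢
      rw [PySem.Chars.join_cons_cons, this, PySem.Chars.join_cons_cons]
      simp

theorem cleanRel_step (s : List Char) (ws : List (List Char)) (t : List Char)
    (h : cleanRel s ws) : cleanRel (cleanStepA s t) (cleanStepB ws t) := by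
  unfold cleanStepA cleanStepB
  by_cases hsw : PySem.Chars.startswith t ['#', '#'] = true
  · rw [if_pos hsw, if_pos hsw]
    rcases h with ⟨hs, hw⟩ | ⟨hne, hs⟩
    · subst hs hw
      right
      refine ⟨by simp, Or.inl ?_⟩
      simp [PySem.Chars.join_singleton]
    · obtain ⟨w, hw⟩ := List.getLast?_isSome.mpr hne |> Option.isSome_iff_exists.mp
      rw [hw]
      right
      refine ⟨by simp, ?_⟩
      rw [join_append_last ws w _ hw]
      rcases hs with hs | hs <;> [left; right] <;> simp [hs]
  · rw [if_neg hsw, if_neg hsw]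
    rcases h with ⟨hs, hw⟩ | ⟨hne, hs⟩
    · subst hs hw
      right
      refine ⟨by simp, Or.inr ?_⟩
      simp [PySem.Chars.join_singleton]
    · right
      refine ⟨by simp, ?_⟩
      rw [join_snoc ws t hne]
      rcases hs with hs | hs <;> [left; right] <;> simp [hs]

theorem cleanRel_foldl (tokens : List String) (s : List Char) (ws : List (List Char))
    (h : cleanRel s ws) :
    cleanRel (tokens.foldl (fun acc t => cleanStepA acc t.toList) s)
             (tokens.foldl (fun ws t => cleanStepB ws t.toList) ws) := by
  induction tokens generalizing s ws with
  | nil => exact h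
  | cons t tl ih => exact ih _ _ (cleanRel_step s ws t.toList h)

theorem strip_cons_space (x : List Char) :
    PySem.Chars.strip (' ' :: x) = PySem.Chars.strip x := by
  simp [PySem.Chars.strip, PySem.Chars.lstrip, List.dropWhile, PySem.Chars.isspace]

-- ===== VERDICT (by name: the statement is the Claim_ definition above) =====
theorem clean_tokens_spec : Claim_equal_clean_tokens := by
  intro tokens _
  unfold Spec_clean_tokens clean_tokens clean_tokens_alt
  have h := cleanRel_foldl tokens [] [] (Or.inl ⟨rfl, rfl⟩)
  rcases h with ⟨hs, hw⟩ | ⟨_, hs | hs⟩ <;>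
    rw [hs] <;> simp_all [PySem.Chars.join_nil, strip_cons_space]
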